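-- pv_equiv track=rewrite | github.com/yejuntian/pythonProject | scripts/changeFileContent/exchangeFileContent.py | group_files
-- ===== SOURCE A (Python) =====
-- def group_files(file_list):
--     # 按照文件名（忽略大小写）进行分组
--     groups = {}
--
--     for file in file_list:
--         # 提取基础文件名（忽略大小写），去掉扩展名
--         base_name = file.split('.')[0].lower()
--         if base_name not in groups:
--             groups[base_name] = []
--         groups[base_name].append(file)
--
--     return groups
-- ===== SOURCE B (Python) =====
-- def group_files(file_list):
--     # Two-pass alternative: dedup of keys (first-occurrence order), then one
--     # filter pass per key; no dict mutation during traversal.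
--     def key(f):
--         return f.split('.')[0].lower()
--     keys = dict.fromkeys(key(f) for f in file_list)
--     return {k: [f for f in file_list if key(f) == k] for k in keys}
-- ===== Notes on version B (the rewrite author's own statement) =====
-- stated objective: alternative
-- what changed: Replaces the single-pass dict mutation (create-empty-then-append per file) with a two-pass decomposition: ordered dedup of the lowercased base-name keys, then one filter comprehension per key.
import Mathlib
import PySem

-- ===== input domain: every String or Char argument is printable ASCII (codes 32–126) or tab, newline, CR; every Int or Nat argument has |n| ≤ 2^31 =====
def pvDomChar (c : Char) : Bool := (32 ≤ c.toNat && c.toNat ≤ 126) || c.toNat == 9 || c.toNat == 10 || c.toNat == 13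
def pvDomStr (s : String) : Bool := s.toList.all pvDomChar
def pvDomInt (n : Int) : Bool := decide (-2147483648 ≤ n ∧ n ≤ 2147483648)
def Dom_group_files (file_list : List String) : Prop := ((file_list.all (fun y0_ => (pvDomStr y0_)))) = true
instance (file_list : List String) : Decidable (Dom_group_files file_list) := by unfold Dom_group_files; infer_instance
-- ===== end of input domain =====

-- B replaces A's single-pass dict mutation by an ordered dedup of the keys followed by
-- one filter pass per key (alternative decomposition, same return value).

-- shared key function: file.split('.')[0].lower()  ([0] is the head: split never returns [])
def gKey (file : String) : String :=
  PySem.Str.lower (((PySem.Str.split? file ".").getD []).headD "")  -- split? "." = some …; [0] is the head (split never empty)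

-- ===== PORT A =====
def group_files (file_list : List String) : List (String × List String) :=
  (file_list.foldl (fun groups file =>
      let base_name := gKey file
      let groups :=
        if groups.contains base_name then groups
        else groups.insert base_name ([] : List String)
      groups.modify base_name [] (fun l => l ++ [file]))   -- groups[base_name].append(file)
    PySem.Dict.empty).items

-- ===== PORT B =====
def group_files_alt (file_list : List String) : List (String × List String) :=
  let keys := PySem.List.dedup (file_list.map gKey)
  keys.map (fun k => (k, file_list.filter (fun f => gKey f == k)))

-- ===== PRECONDITION & SPEC =====
def Spec_group_files (file_list : List String) (out : List (String × List String)) : Prop := out = group_files_alt file_list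
instance (file_list : List String) (out : List (String × List String)) : Decidable (Spec_group_files file_list out) := by unfold Spec_group_files; infer_instance

-- ===== CLAIM (what is proved, stated in full; the proofs are below) =====
def Claim_equal_group_files : Prop := ∀ (file_list : List String), Dom_group_files file_list → Spec_group_files file_list (group_files file_list)

-- ===== LEMMAS AND PROOFS =====

-- A's loop body (conditional empty-insert, then append) is one modify step
theorem stepA_eq_modify (d : PySem.Dict String (List String)) (file : String) :
    (if d.contains (gKey file) then d else d.insert (gKey file) ([] : List String)).modify
        (gKey file) [] (fun l => l ++ [file])
      = d.modify (gKey file) [] (fun l => l ++ [file]) := by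
  by_cases h : d.contains (gKey file) = true
  · simp [h]
  · have hg : d.getD (gKey file) ([] : List String) = [] :=
      PySem.Dict.getD_of_not_contains d ([] : List String) (by simpa using h)
    simp [h, PySem.Dict.modify, PySem.Dict.getD_insert_self, PySem.Dict.insert_insert_self, hg]

theorem foldA_eq (file_list : List String) :
    file_list.foldl (fun groups file =>
      let base_name := gKey file
      let groups :=
        if groups.contains base_name then groups
        else groups.insert base_name ([] : List String)
      groups.modify base_name [] (fun l => l ++ [file])) PySem.Dict.empty
    = file_list.foldl (fun d file => d.modify (gKey file) [] (fun l => l ++ [file]))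
        PySem.Dict.empty := by
  exact PySem.List.foldl_congr_mem _ _ _ _ (fun d file _ => stepA_eq_modify d file)

-- ===== VERDICT (by name: the statement is the Claim_ definition above) =====
theorem group_files_spec : Claim_equal_group_files := by
  intro file_list _
  unfold Spec_group_files group_files group_files_alt
  rw [foldA_eq]
  set D := file_list.foldl (fun d file => d.modify (gKey file) [] (fun l => l ++ [file]))
      PySem.Dict.empty with hD
  have hnd : D.keys.Nodup := by
    exact PySem.Dict.nodup_keys_foldl_modify_key file_list gKey [] _ _ (by simp)
  have hkeys : D.keys = PySem.List.dedup (file_list.map gKey) := by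
    rw [hD, PySem.Dict.keys_foldl_modify_key]
    simp [PySem.Set.update_nil_left]
  have hget : ∀ c, D.getD c [] = file_list.filter (fun f => gKey f == c) := by
    intro c
    have hmap : D = (file_list.map (fun f => (gKey f, f))).foldl
        (fun d p => d.modify p.1 [] (fun l => l ++ [p.2])) PySem.Dict.empty := by
      rw [hD, List.foldl_map]
    rw [hmap, PySem.Dict.getD_foldl_modify_append]
    simp [List.filter_map, List.map_map, Function.comp_def]
  rw [PySem.Dict.items_eq_map_keys D hnd [], hkeys]
  exact List.map_congr_left (fun k _ => by rw [hget k])
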